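-- pv_equiv track=rewrite | github.com/JiwonHwang01/StudyToday | BAEKJOON/구현/20061.py | block2
-- ===== SOURCE A (Python) =====
-- def search(board, x, y, lst):
--     if board[y][x] == 1:
--         return lst
--     lst.append(y)
--     if y == 5:
--         return lst
--
--     return search(board, x, y+1, lst)
--
-- def block2(board, x):
--     tmp = []
--     search(board, x, 0, tmp)
--
--     for pos in tmp[::-1]:
--         if board[pos-1][x] == 0:
--             board[pos][x] = 1
--             board[pos-1][x] = 1
--             break
--
--     return board
-- ===== SOURCE B (Python) =====
-- def block2(board, x):
--     # Single forward pass: while scanning the empty prefix of column x,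
--     # remember the last row whose upper neighbour is 0; then do one write.
--     best = None
--     y = 0
--     while y < 6 and board[y][x] != 1:
--         if board[y - 1][x] == 0:
--             best = y
--         y += 1
--     if best is not None:
--         board[best][x] = 1
--         board[best - 1][x] = 1
--     return board
-- ===== Notes on version B (the rewrite author's own statement) =====
-- stated objective: simpler
-- what changed: Replaces A's recursive helper that materialises the list of empty rows plus a second reverse loop with one self-contained forward scan that tracks the last row whose upper neighbour is 0, followed by a single conditional write.
-- outside the precondition, e.g. on block2([[0], [0], [1], []], 0): A returns [[1], [1], [1], []], B raises IndexError; on block2([[1], []], 0): A returns [[1], []], B returns [[1], []]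
import Mathlib
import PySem

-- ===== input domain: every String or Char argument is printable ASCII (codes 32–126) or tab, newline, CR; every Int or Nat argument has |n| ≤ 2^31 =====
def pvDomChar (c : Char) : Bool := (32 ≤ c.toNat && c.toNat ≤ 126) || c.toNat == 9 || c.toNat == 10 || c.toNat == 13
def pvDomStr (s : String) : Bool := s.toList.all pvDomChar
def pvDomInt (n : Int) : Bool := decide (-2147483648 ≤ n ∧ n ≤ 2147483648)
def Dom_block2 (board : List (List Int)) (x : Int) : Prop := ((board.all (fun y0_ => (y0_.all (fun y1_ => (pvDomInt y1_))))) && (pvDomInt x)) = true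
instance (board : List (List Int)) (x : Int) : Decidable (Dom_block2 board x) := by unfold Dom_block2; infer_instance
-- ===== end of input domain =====

-- B changes the decomposition only (one forward scan + one write instead of recursion, a list and a
-- reverse loop); the equivalence is about the RETURN value (the Python versions mutate `board` in place).

-- board[y][x] as a total read (exact under Pre_, which puts every raising input outside the claim)
def pvCell (board : List (List Int)) (y x : Int) : Int :=
  PySem.List.pyGetD (PySem.List.pyGetD board y []) x 0

-- board[y][x] = v  (row y replaced by its updated copy; same order of writes as the Python)
def pvSetCell (board : List (List Int)) (y x v : Int) : List (List Int) :=
  PySem.List.pySetD board y (PySem.List.pySetD (PySem.List.pyGetD board y []) x v)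

-- ===== PORT A =====
-- search(board, x, y, lst): recursion bounded by fuel (the Python recursion runs y = 0..5)
def searchA (board : List (List Int)) (x : Int) : Nat → Int → List Int → List Int
  | 0, _, lst => lst
  | fuel + 1, y, lst =>
    if pvCell board y x = 1 then lst
    else
      let lst := lst ++ [y]
      if y = 5 then lst else searchA board x fuel (y + 1) lst

-- the `for pos in tmp[::-1]` loop with its break
def loopA (board : List (List Int)) (x : Int) : List Int → List (List Int)
  | [] => board
  | pos :: rest =>
    if pvCell board (pos - 1) x = 0 then
      let board := pvSetCell board pos x 1
      pvSetCell board (pos - 1) x 1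
    else loopA board x rest

def block2 (board : List (List Int)) (x : Int) : List (List Int) :=
  let tmp := searchA board x 6 0 []
  loopA board x tmp.reverse

-- ===== PORT B =====
-- the while loop: scan the empty prefix of column x, remembering the last y with board[y-1][x] == 0
def scanB (board : List (List Int)) (x : Int) : Nat → Int → Option Int → Option Int
  | 0, _, best => best
  | fuel + 1, y, best =>
    if y < 6 ∧ pvCell board y x ≠ 1 then
      scanB board x fuel (y + 1) (if pvCell board (y - 1) x = 0 then some y else best)
    else best

def block2_alt (board : List (List Int)) (x : Int) : List (List Int) :=
  match scanB board x 7 0 none with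
  | none => board
  | some b =>
    let board := pvSetCell board b x 1
    pvSetCell board (b - 1) x 1

-- ===== PRECONDITION & SPEC =====
-- Pre_ = the rectangular-board domain on which the Python A returns: x is a valid (possibly negative)
-- index for EVERY row, and the downward scan terminates (≥ 6 rows, or some row holds 1 at x).
-- It excludes ragged boards whose out-of-range rows A's short-circuiting scan happens never to read
-- (A still returns there by accident of evaluation order; B may read one more row and raise).
def Pre_block2 (board : List (List Int)) (x : Int) : Prop :=
  (∀ row ∈ board, PySem.Raise.InRange row.length x) ∧
  (6 ≤ board.length ∨ ∃ row ∈ board, PySem.List.pyGetD row x 0 = 1)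

instance (board : List (List Int)) (x : Int) : Decidable (Pre_block2 board x) := by
  unfold Pre_block2; infer_instance

def pvWitness_block2 : List (List Int) × Int :=
  ([[0, 0], [0, 0], [1, 0], [0, 1], [0, 0], [0, 0]], 0)

def Spec_block2 (board : List (List Int)) (x : Int) (out : List (List Int)) : Prop := out = block2_alt board x
instance (board : List (List Int)) (x : Int) (out : List (List Int)) : Decidable (Spec_block2 board x out) := by unfold Spec_block2; infer_instance

-- ===== CLAIM (what is proved, stated in full; the proofs are below) =====
def Claim_equal_block2 : Prop := ∀ (board : List (List Int)) (x : Int), Dom_block2 board x → Pre_block2 board x → Spec_block2 board x (block2 board x)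

-- ===== LEMMAS AND PROOFS =====
-- proof helper: the single conditional write B performs at the end
def applyOpt (board : List (List Int)) (x : Int) : Option Int → List (List Int)
  | none => board
  | some b => pvSetCell (pvSetCell board b x 1) (b - 1) x 1

theorem searchA_succ (board : List (List Int)) (x : Int) (f : Nat) (y : Int) (lst : List Int) :
    searchA board x (f + 1) y lst
      = if pvCell board y x = 1 then lst
        else if y = 5 then lst ++ [y] else searchA board x f (y + 1) (lst ++ [y]) := rfl

theorem scanB_succ (board : List (List Int)) (x : Int) (f : Nat) (y : Int) (best : Option Int) :
    scanB board x (f + 1) y best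
      = if y < 6 ∧ pvCell board y x ≠ 1
        then scanB board x f (y + 1) (if pvCell board (y - 1) x = 0 then some y else best)
        else best := rfl

theorem loopA_reverse_append (board : List (List Int)) (x : Int) (lst : List Int) (y : Int)
    (best : Option Int) (h : loopA board x lst.reverse = applyOpt board x best) :
    loopA board x (lst ++ [y]).reverse
      = applyOpt board x (if pvCell board (y - 1) x = 0 then some y else best) := by
  by_cases hd : pvCell board (y - 1) x = 0
  · simp [loopA, hd, applyOpt]
  · simp [loopA, hd, h]

theorem key (board : List (List Int)) (x : Int) :
    ∀ (fuel : Nat), fuel ≤ 6 → ∀ (lst : List Int) (best : Option Int),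
      loopA board x lst.reverse = applyOpt board x best →
      loopA board x ((searchA board x fuel ((6 : Int) - fuel) lst).reverse)
        = applyOpt board x (scanB board x (fuel + 1) ((6 : Int) - fuel) best) := by
  intro fuel
  induction fuel with
  | zero =>
    intro _ lst best h
    simpa [searchA, scanB] using h
  | succ f ih =>
    intro hle lst best h
    have e1 : ((6 : Int) - ↑(f + 1)) = 5 - ↑f := by push_cast; ring
    rw [e1, searchA_succ, scanB_succ]
    by_cases hc : pvCell board ((5 : Int) - ↑f) x = 1
    · rw [if_pos hc, if_neg (by simp [hc])]
      exact h
    · have hlt : ((5 : Int) - ↑f) < 6 := by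
        have : (0 : Int) ≤ ↑f := Int.natCast_nonneg f
        omega
      have hg : ((5 : Int) - ↑f < 6 ∧ pvCell board ((5 : Int) - ↑f) x ≠ 1) := ⟨hlt, hc⟩
      rw [if_neg hc, if_pos hg]
      have hstep := loopA_reverse_append board x lst ((5 : Int) - ↑f) best h
      by_cases hf : f = 0
      · subst hf
        have h5 : ((5 : Int) - ↑(0 : Nat)) = 5 := by norm_num
        rw [h5] at hstep ⊢
        rw [if_pos rfl, scanB_succ,
          if_neg (show ¬((5 : Int) + 1 < 6 ∧ pvCell board (5 + 1) x ≠ 1) by norm_num)]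
        exact hstep
      · have hne : ((5 : Int) - ↑f) ≠ 5 := by
          have : (0 : Int) < ↑f := by exact_mod_cast Nat.pos_of_ne_zero hf
          omega
        rw [if_neg hne]
        have e2 : ((5 : Int) - ↑f) + 1 = 6 - ↑f := by ring
        rw [e2]
        exact ih (by omega) (lst ++ [(5 : Int) - ↑f]) _ hstep

-- ===== VERDICT (by name: the statement is the Claim_ definition above) =====
theorem block2_spec : Claim_equal_block2 := by
  intro board x _ _
  unfold Spec_block2 block2 block2_alt
  have h0 : loopA board x ([] : List Int).reverse = applyOpt board x none := rfl
  have := key board x 6 (by omega) [] none h0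
  norm_num at this
  rw [this]
  cases scanB board x 7 0 none <;> rfl
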